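-- pv_equiv track=rewrite | github.com/ankit2nexus/MetaBolic-Backend | scrapers/python313_compatible_scraper.py | is_health_related
-- ===== SOURCE A (Python) =====
-- def is_health_related(title: str, summary: str) -> bool:
--     """Check if content is health-related"""
--     text = f"{title} {summary}".lower()
--
--     health_keywords = [
--         'health', 'medical', 'disease', 'illness', 'condition', 'treatment',
--         'doctor', 'hospital', 'medicine', 'drug', 'therapy', 'cure',
--         'nutrition', 'diet', 'fitness', 'wellness', 'prevention',
--         'cancer', 'diabetes', 'heart', 'brain', 'mental', 'anxiety',
--         'depression', 'vaccine', 'virus', 'infection', 'covid', 'flu',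
--         'research', 'study', 'clinical', 'patient', 'healthcare'
--     ]
--
--     # Must contain at least 1 health keyword
--     health_count = sum(1 for keyword in health_keywords if keyword in text)
--     return health_count >= 1
-- ===== SOURCE B (Python) =====
-- def is_health_related(title: str, summary: str) -> bool:
--     """Check if content is health-related: single left-to-right scan of the
--     text, testing at each position whether any keyword starts there."""
--     text = f"{title} {summary}".lower()
--
--     keywords = ("health medical disease illness condition treatment "
--                 "doctor hospital medicine drug therapy cure "
--                 "nutrition diet fitness wellness prevention "
--                 "cancer diabetes heart brain mental anxiety "
--                 "depression vaccine virus infection covid flu "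
--                 "research study clinical patient healthcare").split()
--
--     i = 0
--     while i < len(text):
--         for kw in keywords:
--             if text.startswith(kw, i):
--                 return True
--         i += 1
--     return False
-- ===== Notes on version B (the rewrite author's own statement) =====
-- stated objective: alternative
-- what changed: A runs a separate substring scan of the text for each of the 34 keywords and counts hits; B keeps the keywords as one space-separated string split at runtime and makes a single left-to-right pass over the text, testing at each position whether any keyword starts there, returning at the first match.
import Mathlib
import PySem

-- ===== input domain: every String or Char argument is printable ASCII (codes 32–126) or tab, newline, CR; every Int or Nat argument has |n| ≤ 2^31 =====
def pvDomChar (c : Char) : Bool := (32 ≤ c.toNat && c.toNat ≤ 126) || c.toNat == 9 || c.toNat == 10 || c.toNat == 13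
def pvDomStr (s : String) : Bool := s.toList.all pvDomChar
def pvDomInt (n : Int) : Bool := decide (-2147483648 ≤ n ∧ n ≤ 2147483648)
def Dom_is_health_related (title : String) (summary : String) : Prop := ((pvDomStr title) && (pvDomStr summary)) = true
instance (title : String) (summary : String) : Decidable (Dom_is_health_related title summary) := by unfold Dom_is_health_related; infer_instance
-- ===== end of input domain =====

-- B stores the keywords as one space-separated string split at runtime and replaces A's 34
-- separate `kw in text` substring scans by ONE left-to-right scan of the text that tests at
-- each position whether any keyword starts there (objective: alternative; not measured faster).

-- ===== PORT A =====
-- A's literal keyword list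
def healthKeywords : List (List Char) :=
  ["health".toList, "medical".toList, "disease".toList, "illness".toList, "condition".toList,
  "treatment".toList, "doctor".toList, "hospital".toList, "medicine".toList, "drug".toList,
  "therapy".toList, "cure".toList, "nutrition".toList, "diet".toList, "fitness".toList,
  "wellness".toList, "prevention".toList, "cancer".toList, "diabetes".toList, "heart".toList,
  "brain".toList, "mental".toList, "anxiety".toList, "depression".toList, "vaccine".toList,
  "virus".toList, "infection".toList, "covid".toList, "flu".toList, "research".toList,
  "study".toList, "clinical".toList, "patient".toList, "healthcare".toList]

def is_health_related (title : String) (summary : String) : Bool :=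
  let text := PySem.Chars.lower (title.toList ++ ' ' :: summary.toList)
  decide (1 ≤ (healthKeywords.map (fun kw => if PySem.Chars.isIn kw text then (1 : Int) else 0)).sum)

-- ===== PORT B =====
-- B's keyword storage: one space-separated string, split at runtime (Python `.split()`)
def pvKeywordBlob : List Char :=
  ("health medical disease illness condition treatment " ++
   "doctor hospital medicine drug therapy cure " ++
   "nutrition diet fitness wellness prevention " ++
   "cancer diabetes heart brain mental anxiety " ++
   "depression vaccine virus infection covid flu " ++
   "research study clinical patient healthcare").toList

-- the while-loop of Source B: advance i through the text (here: structurally through the suffix),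
-- at each position testing whether some keyword starts there, returning at the first match
def pvScan (kws : List (List Char)) : List Char → Bool
  | [] => false
  | c :: rest => kws.any (fun kw => PySem.Chars.startswith (c :: rest) kw) || pvScan kws rest

def is_health_related_alt (title : String) (summary : String) : Bool :=
  let text := PySem.Chars.lower (title.toList ++ ' ' :: summary.toList)
  pvScan (PySem.Chars.split₀ pvKeywordBlob) text

-- ===== PRECONDITION & SPEC =====
def Spec_is_health_related (title : String) (summary : String) (out : Bool) : Prop := out = is_health_related_alt title summary
instance (title : String) (summary : String) (out : Bool) : Decidable (Spec_is_health_related title summary out) := by unfold Spec_is_health_related; infer_instance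

-- ===== CLAIM (what is proved, stated in full; the proofs are below) =====
def Claim_equal_is_health_related : Prop := ∀ (title : String) (summary : String), Dom_is_health_related title summary → Spec_is_health_related title summary (is_health_related title summary)

-- ===== LEMMAS AND PROOFS =====

-- splitting B's blob yields exactly A's keyword list
set_option maxRecDepth 20000 in
lemma split_blob_eq : PySem.Chars.split₀ pvKeywordBlob = healthKeywords := by decide

lemma healthKeywords_ne_nil : ∀ kw ∈ healthKeywords, kw ≠ [] := by decide

-- pvScan finds exactly the suffix positions where some keyword is a prefix
lemma pvScan_iff (kws : List (List Char)) (hne : ∀ kw ∈ kws, kw ≠ []) :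
    ∀ t : List Char, pvScan kws t = true ↔ ∃ kw ∈ kws, ∃ j : Nat, kw <+: t.drop j := by
  intro t
  induction t with
  | nil =>
    simp only [pvScan, List.drop_nil]
    constructor
    · intro h; exact absurd h (by simp)
    · rintro ⟨kw, hkw, _, hpre⟩
      exact absurd (List.prefix_nil.mp hpre) (hne kw hkw)
  | cons c rest ih =>
    simp only [pvScan, Bool.or_eq_true, List.any_eq_true, PySem.Chars.startswith_iff, ih]
    constructor
    · rintro (⟨kw, hkw, hpre⟩ | ⟨kw, hkw, j, hpre⟩)
      · exact ⟨kw, hkw, 0, by simpa using hpre⟩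
      · exact ⟨kw, hkw, j + 1, by simpa using hpre⟩
    · rintro ⟨kw, hkw, j, hpre⟩
      cases j with
      | zero => exact Or.inl ⟨kw, hkw, by simpa using hpre⟩
      | succ j => exact Or.inr ⟨kw, hkw, j, by simpa using hpre⟩

-- A's 0/1-sum is positive iff some keyword is contained in the text
lemma countA_iff (text : List Char) :
    (1 ≤ (healthKeywords.map (fun kw => if PySem.Chars.isIn kw text then (1 : Int) else 0)).sum)
      ↔ ∃ kw ∈ healthKeywords, PySem.Chars.isIn kw text = true := by
  rw [PySem.List.sum_map_ite_one_zero]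
  rw [show (1 : Int) ≤ ((healthKeywords.countP (fun kw => PySem.Chars.isIn kw text) : Nat) : Int)
        ↔ 0 < healthKeywords.countP (fun kw => PySem.Chars.isIn kw text) from by exact_mod_cast Iff.rfl]
  rw [List.countP_pos_iff]

-- ===== VERDICT (by name: the statement is the Claim_ definition above) =====
theorem is_health_related_spec : Claim_equal_is_health_related := by
  intro title summary _
  unfold Spec_is_health_related is_health_related is_health_related_alt
  rw [split_blob_eq, Bool.eq_iff_iff]
  rw [decide_eq_true_eq, countA_iff, pvScan_iff healthKeywords healthKeywords_ne_nil]
  constructor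
  · rintro ⟨kw, hkw, hin⟩
    obtain ⟨j, hj⟩ := (PySem.Chars.exists_prefix_drop_iff_isIn kw _).mpr hin
    exact ⟨kw, hkw, j, hj⟩
  · rintro ⟨kw, hkw, j, hj⟩
    exact ⟨kw, hkw, (PySem.Chars.exists_prefix_drop_iff_isIn kw _).mp ⟨j, hj⟩⟩
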